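-- pv_equiv track=rewrite | github.com/anonymous0706/Project_Cat2 | working_chatbot_statemachines.py | get_entity_types_and_templates
-- ===== SOURCE A (Python) =====
-- def get_entity_types_and_templates(page: int = 1) -> str:
--     """
--     Returns available entity types and templates for browsing.
--     """
--     # Mock implementation - would connect to actual catalog in production
--     entity_templates = {
--         "Package": ["Mobile Base Offer", "Fixed Line Package", "Data-only Package", "Family Package", "Business Package"],
--         "Bundle": ["Entertainment Bundle", "Security Bundle", "Productivity Bundle"],
--         "Component": ["SIM Component", "Usage Component", "Charging Component"],
--         "Promotion": ["Seasonal Promotion", "Loyalty Promotion", "Acquisition Promotion"],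
--         "Component Group": ["Base Components", "Add-on Components", "Charging Components"]
--     }
--
--     items_per_page = 5
--
--     # Calculate total items and pages
--     total_templates = 0
--     entity_types_list = []
--
--     for entity_type, templates in entity_templates.items():
--         total_templates += len(templates)
--         entity_types_list.append(entity_type)
--
--     total_pages = (total_templates + items_per_page - 1) // items_per_page
--
--     # Ensure page is within bounds
--     page = max(1, min(page, total_pages))
--
--     response = "**Available Entity Types and Templates:**\n\n"
--
--     current_item = 0
--     items_on_current_page = 0
--
--     for entity_type, templates in entity_templates.items():
--         # Skip items before the current page
--         if current_item + len(templates) <= (page - 1) * items_per_page: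
--             current_item += len(templates)
--             continue
--
--         # Start displaying this entity type
--         response += f"**{entity_type}**\n"
--
--         for i, template in enumerate(templates, 1):
--             # Skip items before the current page
--             if current_item < (page - 1) * items_per_page:
--                 current_item += 1
--                 continue
--
--             response += f"{i}. {template}\n"
--             current_item += 1
--             items_on_current_page += 1
--
--             # Stop if we've filled the page
--             if items_on_current_page >= items_per_page:
--                 break
--
--         response += "\n"
--
--         # Stop if we've filled the page
--         if items_on_current_page >= items_per_page:
--             break
--
--     # Add pagination information
--     response += f"\n*Showing page {page} of {total_pages}*"
--
--     if page < total_pages: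
--         response += " - Type 'more' to see additional options"
--
--     response += "\n\nSelect a template by typing its number or name (e.g., 'Select Mobile Base Offer')"
--     response += "\nOr type 'exit browsing' to choose a different approach"
--
--     return response
-- ===== SOURCE B (Python) =====
-- def get_entity_types_and_templates(page: int = 1) -> str:
--     """
--     Returns available entity types and templates for browsing.
--     """
--     entity_templates = {
--         "Package": ["Mobile Base Offer", "Fixed Line Package", "Data-only Package", "Family Package", "Business Package"],
--         "Bundle": ["Entertainment Bundle", "Security Bundle", "Productivity Bundle"],
--         "Component": ["SIM Component", "Usage Component", "Charging Component"],
--         "Promotion": ["Seasonal Promotion", "Loyalty Promotion", "Acquisition Promotion"],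
--         "Component Group": ["Base Components", "Add-on Components", "Charging Components"]
--     }
--
--     items_per_page = 5
--     # Flatten the catalog once, remembering each template's 1-based index in its own type.
--     flat = [(etype, i, tpl)
--             for etype, tpls in entity_templates.items()
--             for i, tpl in enumerate(tpls, 1)]
--
--     total_templates = len(flat)
--     total_pages = (total_templates + items_per_page - 1) // items_per_page
--     page = max(1, min(page, total_pages))
--
--     start = (page - 1) * items_per_page
--     chunk = flat[start:start + items_per_page]
--
--     parts = ["**Available Entity Types and Templates:**\n\n"]
--     prev = None
--     for etype, i, tpl in chunk:
--         if etype != prev: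
--             if prev is not None:
--                 parts.append("\n")
--             parts.append(f"**{etype}**\n")
--             prev = etype
--         parts.append(f"{i}. {tpl}\n")
--     parts.append("\n")
--
--     parts.append(f"\n*Showing page {page} of {total_pages}*")
--     if page < total_pages:
--         parts.append(" - Type 'more' to see additional options")
--     parts.append("\n\nSelect a template by typing its number or name (e.g., 'Select Mobile Base Offer')")
--     parts.append("\nOr type 'exit browsing' to choose a different approach")
--     return "".join(parts)
-- ===== Notes on version B (the rewrite author's own statement) =====
-- stated objective: simpler
-- what changed: Replaces A's nested skip-and-count loops (per-item skipping and page-fill counters with breaks) by flattening the catalog once into (type, index, template) triples, slicing out the requested page and grouping consecutive same-type entries.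
import Mathlib
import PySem

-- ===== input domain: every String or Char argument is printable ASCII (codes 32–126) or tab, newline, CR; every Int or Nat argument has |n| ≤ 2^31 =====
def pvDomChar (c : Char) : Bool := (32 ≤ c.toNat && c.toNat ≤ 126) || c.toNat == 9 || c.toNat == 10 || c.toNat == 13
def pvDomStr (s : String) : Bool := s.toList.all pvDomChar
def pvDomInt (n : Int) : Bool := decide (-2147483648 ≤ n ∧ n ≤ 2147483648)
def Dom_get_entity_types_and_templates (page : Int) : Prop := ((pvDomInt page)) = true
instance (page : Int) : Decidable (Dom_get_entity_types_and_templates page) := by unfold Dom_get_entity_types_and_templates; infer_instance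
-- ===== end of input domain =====

-- B replaces A's skip-and-count double loop by flattening the catalog once, slicing the
-- requested page out of the flat list and grouping consecutive same-type entries (simpler).

-- ===== PORT A =====
-- the dict literal (distinct keys, insertion order) as an association list
def pvCatalog : List (String × List String) :=
  [ ("Package", ["Mobile Base Offer", "Fixed Line Package", "Data-only Package", "Family Package", "Business Package"]),
    ("Bundle", ["Entertainment Bundle", "Security Bundle", "Productivity Bundle"]),
    ("Component", ["SIM Component", "Usage Component", "Charging Component"]),
    ("Promotion", ["Seasonal Promotion", "Loyalty Promotion", "Acquisition Promotion"]),
    ("Component Group", ["Base Components", "Add-on Components", "Charging Components"]) ]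

-- inner 'for i, template in enumerate(templates, 1)' loop: state (response, current_item, items_on_current_page)
def pvAInner (page : Int) : List String → Int → String → Int → Int → String × Int × Int
  | [], _, resp, cur, cnt => (resp, cur, cnt)
  | t :: rest, i, resp, cur, cnt =>
    if cur < (page - 1) * 5 then
      pvAInner page rest (i + 1) resp (cur + 1) cnt
    else
      let resp := resp ++ PySem.Int.toStr i ++ ". " ++ t ++ "\n"
      let cur := cur + 1
      let cnt := cnt + 1
      if cnt ≥ 5 then (resp, cur, cnt)
      else pvAInner page rest (i + 1) resp cur cnt

-- outer 'for entity_type, templates in entity_templates.items()' loop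
def pvAOuter (page : Int) : List (String × List String) → String → Int → Int → String
  | [], resp, _, _ => resp
  | (et, templates) :: rest, resp, cur, cnt =>
    if cur + (templates.length : Int) ≤ (page - 1) * 5 then
      pvAOuter page rest resp (cur + (templates.length : Int)) cnt
    else
      let resp := resp ++ "**" ++ et ++ "**\n"
      let s := pvAInner page templates 1 resp cur cnt
      let resp := s.1 ++ "\n"
      if s.2.2 ≥ 5 then resp
      else pvAOuter page rest resp s.2.1 s.2.2

-- everything after 'page = max(1, min(page, total_pages))', as a function of the clamped page
def pvAFinish (total_pages page : Int) : String :=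
  let response := "**Available Entity Types and Templates:**\n\n"
  let response := pvAOuter page pvCatalog response 0 0
  let response := response ++ "\n*Showing page " ++ PySem.Int.toStr page ++ " of " ++ PySem.Int.toStr total_pages ++ "*"
  let response := if page < total_pages then response ++ " - Type 'more' to see additional options" else response
  let response := response ++ "\n\nSelect a template by typing its number or name (e.g., 'Select Mobile Base Offer')"
  response ++ "\nOr type 'exit browsing' to choose a different approach"

def get_entity_types_and_templates (page : Int) : String :=
  let items_per_page : Int := 5
  let total_templates : Int := pvCatalog.foldl (fun acc p => acc + (p.2.length : Int)) 0
  let total_pages := PySem.Int.floordiv (total_templates + items_per_page - 1) items_per_page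
  let page := max 1 (min page total_pages)
  pvAFinish total_pages page

-- ===== PORT B =====
-- the flattened catalog: (entity_type, 1-based index within its type, template)
def pvFlat : List (String × Int × String) :=
  pvCatalog.flatMap (fun p => (PySem.List.enumerate p.2 1).map (fun q => (p.1, q.1, q.2)))

-- grouping loop over the page slice: state (parts-so-far, previous entity type)
def pvBBody : List (String × Int × String) → Option String → String
  | [], _ => "\n"
  | (et, i, tpl) :: rest, prev =>
    (if prev ≠ some et then
       (if prev.isSome then "\n" else "") ++ "**" ++ et ++ "**\n"
     else "")
      ++ PySem.Int.toStr i ++ ". " ++ tpl ++ "\n" ++ pvBBody rest (some et)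

def pvBFinish (total_pages page : Int) : String :=
  let start := (page - 1) * 5
  let chunk := PySem.List.slice pvFlat (some start) (some (start + 5))
  "**Available Entity Types and Templates:**\n\n"
    ++ pvBBody chunk none
    ++ "\n*Showing page " ++ PySem.Int.toStr page ++ " of " ++ PySem.Int.toStr total_pages ++ "*"
    ++ (if page < total_pages then " - Type 'more' to see additional options" else "")
    ++ "\n\nSelect a template by typing its number or name (e.g., 'Select Mobile Base Offer')"
    ++ "\nOr type 'exit browsing' to choose a different approach"

def get_entity_types_and_templates_alt (page : Int) : String :=
  let items_per_page : Int := 5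
  let total_templates : Int := (pvFlat.length : Int)
  let total_pages := PySem.Int.floordiv (total_templates + items_per_page - 1) items_per_page
  let page := max 1 (min page total_pages)
  pvBFinish total_pages page

-- ===== PRECONDITION & SPEC =====
def Spec_get_entity_types_and_templates (page : Int) (out : String) : Prop := out = get_entity_types_and_templates_alt page
instance (page : Int) (out : String) : Decidable (Spec_get_entity_types_and_templates page out) := by unfold Spec_get_entity_types_and_templates; infer_instance

-- ===== CLAIM (what is proved, stated in full; the proofs are below) =====
def Claim_equal_get_entity_types_and_templates : Prop := ∀ (page : Int), Dom_get_entity_types_and_templates page → Spec_get_entity_types_and_templates page (get_entity_types_and_templates page)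

-- ===== LEMMAS AND PROOFS =====
lemma pvA_eq_finish (page : Int) :
    get_entity_types_and_templates page = pvAFinish 4 (max 1 (min page 4)) := rfl

lemma pvB_eq_finish (page : Int) :
    get_entity_types_and_templates_alt page = pvBFinish 4 (max 1 (min page 4)) := rfl

set_option maxRecDepth 10000 in
lemma pvFinish_eq : ∀ p : Int, p = 1 ∨ p = 2 ∨ p = 3 ∨ p = 4 →
    pvAFinish 4 p = pvBFinish 4 p := by
  intro p hp
  rcases hp with h | h | h | h <;> subst h <;> decide

-- ===== VERDICT (by name: the statement is the Claim_ definition above) =====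
theorem get_entity_types_and_templates_spec : Claim_equal_get_entity_types_and_templates := by
  intro page _
  show get_entity_types_and_templates page = get_entity_types_and_templates_alt page
  rw [pvA_eq_finish, pvB_eq_finish]
  apply pvFinish_eq
  omega
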